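-- pv_equiv track=rewrite | github.com/ejones001/my-coding-temple-pythonstrings | sentimenttally.py | track_positive_negative_words
-- ===== SOURCE A (Python) =====
-- def track_positive_negative_words(reviews, positive_words, negative_words):
--     results = []
--     for review in reviews:
--         positive_count = 0
--         negative_count = 0
--         review_lower = review.lower()
--         for word in positive_words:
--             if word in review_lower:
--                 positive_count += 1
--         for word in negative_words:
--             if word in review_lower:
--                 negative_count += 1
--         results.append((positive_count, negative_count))
--     return results
-- ===== SOURCE B (Python) =====
-- def track_positive_negative_words(reviews, positive_words, negative_words):
--     # Build, per review, a hash set of ALL its substrings whose length occurs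
--     # among the words; each word is then tested by one O(1) set lookup instead
--     # of a substring scan.  Correct because 'w in r' holds iff some substring
--     # of r of length len(w) equals w (and '' is a substring of every string).
--     lens = {len(w) for w in positive_words} | {len(w) for w in negative_words}
--     results = []
--     for review in reviews:
--         r = review.lower()
--         subs = set()
--         for L in lens:
--             for i in range(len(r) - L + 1):
--                 subs.add(r[i:i+L])
--         pc = sum(1 for w in positive_words if w in subs)
--         nc = sum(1 for w in negative_words if w in subs)
--         results.append((pc, nc))
--     return results
-- ===== Notes on version B (the rewrite author's own statement) =====
-- stated objective: alternative
-- what changed: B indexes each review once in a hash set of all its substrings of the word lengths, so every word is answered by one set lookup instead of A's per-word substring scan over the review.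
import Mathlib
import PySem

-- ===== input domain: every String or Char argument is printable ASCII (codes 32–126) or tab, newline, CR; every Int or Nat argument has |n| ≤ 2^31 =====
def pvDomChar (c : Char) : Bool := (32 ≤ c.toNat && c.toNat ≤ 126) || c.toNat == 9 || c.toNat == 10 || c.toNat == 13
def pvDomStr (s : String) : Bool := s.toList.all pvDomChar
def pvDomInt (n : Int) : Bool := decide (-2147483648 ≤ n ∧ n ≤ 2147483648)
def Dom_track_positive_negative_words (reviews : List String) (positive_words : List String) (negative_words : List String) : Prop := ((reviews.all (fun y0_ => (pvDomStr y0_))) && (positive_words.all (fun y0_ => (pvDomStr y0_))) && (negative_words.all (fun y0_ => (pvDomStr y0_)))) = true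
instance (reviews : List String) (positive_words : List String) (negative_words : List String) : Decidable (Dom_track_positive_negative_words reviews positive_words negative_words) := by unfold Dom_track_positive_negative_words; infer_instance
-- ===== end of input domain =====

-- B indexes each review once in a hash set of all its substrings of the word lengths, answering
-- each word by one set lookup instead of A's per-word substring scan; alternative structure.

-- ===== PORT A =====
def track_positive_negative_words (reviews : List String) (positive_words : List String) (negative_words : List String) : List (Int × Int) :=
  reviews.foldl (fun results review =>
    let review_lower := PySem.Str.lower review
    let positive_count := positive_words.foldl
      (fun c word => if PySem.Str.isIn word review_lower then c + 1 else c) (0 : Int)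
    let negative_count := negative_words.foldl
      (fun c word => if PySem.Str.isIn word review_lower then c + 1 else c) (0 : Int)
    results ++ [(positive_count, negative_count)]) []

-- ===== PORT B =====
def track_positive_negative_words_alt (reviews : List String) (positive_words : List String) (negative_words : List String) : List (Int × Int) :=
  let lens : PySem.Set Int :=
    PySem.Set.union (PySem.Set.ofList (positive_words.map (fun w => (PySem.Str.len w : Int))))
                    (PySem.Set.ofList (negative_words.map (fun w => (PySem.Str.len w : Int))))
  reviews.foldl (fun results review =>
    let r := PySem.Str.lower review
    let subs : PySem.Set String :=
      lens.foldl (fun subs L =>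
        (PySem.List.pyRange 0 ((PySem.Str.len r : Int) - L + 1) 1).foldl
          (fun subs i => PySem.Set.add subs (PySem.Str.slice r (some i) (some (i + L)))) subs)
        PySem.Set.empty
    let pc := positive_words.foldl (fun c w => if PySem.Set.contains subs w then c + 1 else c) (0 : Int)
    let nc := negative_words.foldl (fun c w => if PySem.Set.contains subs w then c + 1 else c) (0 : Int)
    results ++ [(pc, nc)]) []

-- ===== PRECONDITION & SPEC =====
def Spec_track_positive_negative_words (reviews : List String) (positive_words : List String) (negative_words : List String) (out : List (Int × Int)) : Prop := out = track_positive_negative_words_alt reviews positive_words negative_words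
instance (reviews : List String) (positive_words : List String) (negative_words : List String) (out : List (Int × Int)) : Decidable (Spec_track_positive_negative_words reviews positive_words negative_words out) := by unfold Spec_track_positive_negative_words; infer_instance

-- ===== CLAIM (what is proved, stated in full; the proofs are below) =====
def Claim_equal_track_positive_negative_words : Prop := ∀ (reviews : List String) (positive_words : List String) (negative_words : List String), Dom_track_positive_negative_words reviews positive_words negative_words → Spec_track_positive_negative_words reviews positive_words negative_words (track_positive_negative_words reviews positive_words negative_words)

-- ===== LEMMAS AND PROOFS =====

/-- A bounded slice is an infix of its list (nonnegative bounds). -/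
theorem slice_isInfix {α : Type} (xs : List α) (a b : Int) (ha : 0 ≤ a) (hb : 0 ≤ b) :
    PySem.List.slice xs (some a) (some b) <:+: xs := by
  rw [PySem.List.slice_toNat]
  · exact ((List.take_prefix _ _).isInfix).trans (List.drop_suffix _ _).isInfix
  · exact ha
  · exact hb

/-- Membership in the nested substring-collecting fold of B. -/
theorem mem_subsFold (lens : List Int) (r : String) (init : PySem.Set String) (x : String) :
    (x ∈ lens.foldl (fun subs L =>
        (PySem.List.pyRange 0 ((PySem.Str.len r : Int) - L + 1) 1).foldl
          (fun subs i => PySem.Set.add subs (PySem.Str.slice r (some i) (some (i + L)))) subs)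
        init)
    ↔ x ∈ init ∨ ∃ L ∈ lens, ∃ i ∈ PySem.List.pyRange 0 ((PySem.Str.len r : Int) - L + 1) 1,
        x = PySem.Str.slice r (some i) (some (i + L)) := by
  induction lens generalizing init with
  | nil => simp
  | cons L ls ih =>
    simp only [List.foldl_cons, ih, PySem.Set.mem_foldl_add]
    constructor
    · rintro (((h | ⟨i, hi, rfl⟩) ) | ⟨L', hL', i, hi, rfl⟩)
      · exact Or.inl h
      · exact Or.inr ⟨L, by simp, i, hi, rfl⟩
      · exact Or.inr ⟨L', by simp [hL'], i, hi, rfl⟩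
    · rintro (h | ⟨L', hL', i, hi, rfl⟩)
      · exact Or.inl (Or.inl h)
      · rcases List.mem_cons.mp hL' with rfl | hL'
        · exact Or.inl (Or.inr ⟨i, hi, rfl⟩)
        · exact Or.inr ⟨L', hL', i, hi, rfl⟩

/-- A word whose length is collected in `lens` is in B's substring set iff it is a substring. -/
theorem mem_subs_iff_isIn (lens : List Int) (r w : String)
    (hpos : ∀ L ∈ lens, 0 ≤ L)
    (hlen : ((w.toList.length : Int)) ∈ lens) :
    (w ∈ lens.foldl (fun subs L =>
        (PySem.List.pyRange 0 ((PySem.Str.len r : Int) - L + 1) 1).foldl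
          (fun subs i => PySem.Set.add subs (PySem.Str.slice r (some i) (some (i + L)))) subs)
        PySem.Set.empty)
    ↔ PySem.Str.isIn w r = true := by
  have hrlen : (PySem.Str.len r : Int) = (r.toList.length : Int) := by
    simp [PySem.Str.len_eq]
  rw [mem_subsFold]
  constructor
  · rintro (h | ⟨L, hL, i, hi, rfl⟩)
    · simp [PySem.Set.empty] at h
    · rcases (PySem.List.mem_pyRange_one).mp hi with ⟨h0i, _⟩
      rw [PySem.Str.isIn_iff_infix, PySem.Str.toList_slice]
      exact slice_isInfix _ _ _ h0i (by have := hpos L hL; omega)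
  · intro hin
    have hdrop := (PySem.Chars.exists_prefix_drop_iff_isIn (sub := w.toList) (s := r.toList)).mpr
      (by simpa using hin)
    rcases hdrop with ⟨j, hpre⟩
    by_cases hw : w.toList.length = 0
    · -- empty word: it equals the slice r[0:0]
      refine Or.inr ⟨_, hlen, 0, ?_, ?_⟩
      · rw [PySem.List.mem_pyRange_one]
        refine ⟨le_refl 0, ?_⟩
        rw [hrlen, hw]
        have : (0:Int) ≤ (r.toList.length : Int) := by positivity
        omega
      · refine String.toList_inj.mp ?_
        rw [PySem.Str.toList_slice, PySem.Chars.slice_eq_listSlice, PySem.List.slice_toNat]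
        · rw [hw]
          simp [List.length_eq_zero_iff.mp hw]
        · exact le_refl 0
        · rw [hw]; exact le_refl 0
    · -- nonempty word found at offset j
      have hlenle : w.toList.length ≤ r.toList.length - j := by
        have := hpre.length_le
        simpa using this
      have hjle : j + w.toList.length ≤ r.toList.length := by omega
      refine Or.inr ⟨_, hlen, (j : Int), ?_, ?_⟩
      · rw [PySem.List.mem_pyRange_one]
        refine ⟨by positivity, ?_⟩
        rw [hrlen]; omega
      · refine String.toList_inj.mp ?_
        rw [PySem.Str.toList_slice, PySem.Chars.slice_eq_listSlice, PySem.List.slice_natCast_add]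
        exact List.prefix_iff_eq_take.mp hpre

-- ===== VERDICT (by name: the statement is the Claim_ definition above) =====
theorem track_positive_negative_words_spec : Claim_equal_track_positive_negative_words := by
  intro reviews positive_words negative_words _
  show _ = _
  unfold track_positive_negative_words track_positive_negative_words_alt
  simp only [PySem.List.foldl_append_singleton_eq_map]
  apply List.map_congr_left
  intro review _
  have hpos : ∀ L ∈ (PySem.Set.union
        (PySem.Set.ofList (positive_words.map (fun w => (PySem.Str.len w : Int))))
        (PySem.Set.ofList (negative_words.map (fun w => (PySem.Str.len w : Int)))) : PySem.Set Int),
      0 ≤ L := by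
    intro L hL
    rw [PySem.Set.mem_union, PySem.Set.mem_ofList, PySem.Set.mem_ofList] at hL
    rcases hL with hL | hL <;>
      · rcases List.mem_map.mp hL with ⟨w', _, rfl⟩
        simp [PySem.Str.len_eq]
  have key : ∀ w : String, w ∈ positive_words ∨ w ∈ negative_words →
      PySem.Set.contains
        (((PySem.Set.union (PySem.Set.ofList (positive_words.map (fun w => (PySem.Str.len w : Int))))
            (PySem.Set.ofList (negative_words.map (fun w => (PySem.Str.len w : Int)))) : PySem.Set Int)).foldl
          (fun subs L =>
            (PySem.List.pyRange 0 ((PySem.Str.len (PySem.Str.lower review) : Int) - L + 1) 1).foldl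
              (fun subs i => PySem.Set.add subs
                (PySem.Str.slice (PySem.Str.lower review) (some i) (some (i + L)))) subs)
          PySem.Set.empty) w
      = PySem.Str.isIn w (PySem.Str.lower review) := by
    intro w hw
    have hlen : ((w.toList.length : Int)) ∈
        (PySem.Set.union (PySem.Set.ofList (positive_words.map (fun w => (PySem.Str.len w : Int))))
          (PySem.Set.ofList (negative_words.map (fun w => (PySem.Str.len w : Int)))) : PySem.Set Int) := by
      rw [PySem.Set.mem_union]
      rcases hw with hw | hw
      · exact Or.inl (by rw [PySem.Set.mem_ofList]; exact List.mem_map.mpr ⟨w, hw, by simp [PySem.Str.len_eq]⟩)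
      · exact Or.inr (by rw [PySem.Set.mem_ofList]; exact List.mem_map.mpr ⟨w, hw, by simp [PySem.Str.len_eq]⟩)
    rw [Bool.eq_iff_iff, PySem.Set.contains_iff]
    exact mem_subs_iff_isIn _ _ _ hpos hlen
  congr 1
  · apply PySem.List.foldl_congr_mem
    intro acc w hw
    rw [key w (Or.inl hw)]
  · apply PySem.List.foldl_congr_mem
    intro acc w hw
    rw [key w (Or.inr hw)]
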